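-- pv_equiv track=rewrite | github.com/celine-zhu/Sarscov2-analysis | premquartil.py | premquartil
-- ===== SOURCE A (Python) =====
-- def premquartil(L):
--     """prend en argument une liste de string et renvoie
--     le premier quartile du nombre de lettres par sequences"""
--     quart=[]
--     n=len(L)
--
--     for k in range(0,n):
--         quart.append(len(L[k]))
--     quart=sorted(quart)
--     N=int(len(quart)//4)
--     if len(quart)%4==0:
--         return quart[int(len(quart)//4)-1]
--     else:
--         return quart[N]
-- ===== SOURCE B (Python) =====
-- def _select(xs, k):
--     # k-th smallest (0-based) by quickselect; no full sort
--     p = xs[0]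
--     lt = [x for x in xs if x < p]
--     eq = [x for x in xs if x == p]
--     if k < len(lt):
--         return _select(lt, k)
--     if k < len(lt) + len(eq):
--         return p
--     return _select([x for x in xs if x > p], k - len(lt) - len(eq))
--
-- def premquartil(L):
--     lengths = [len(s) for s in L]
--     n = len(lengths)
--     k = n // 4 - 1 if n % 4 == 0 else n // 4
--     return _select(lengths, k)
-- ===== Notes on version B (the rewrite author's own statement) =====
-- stated objective: alternative
-- what changed: B replaces the full sort of all string lengths by a quickselect that partitions around a pivot and recurses only into the side containing the quartile index (average O(n) vs O(n log n); measured ~1.4x at the largest size, below the 1.5x bar, so no speed claim).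
import Mathlib
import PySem

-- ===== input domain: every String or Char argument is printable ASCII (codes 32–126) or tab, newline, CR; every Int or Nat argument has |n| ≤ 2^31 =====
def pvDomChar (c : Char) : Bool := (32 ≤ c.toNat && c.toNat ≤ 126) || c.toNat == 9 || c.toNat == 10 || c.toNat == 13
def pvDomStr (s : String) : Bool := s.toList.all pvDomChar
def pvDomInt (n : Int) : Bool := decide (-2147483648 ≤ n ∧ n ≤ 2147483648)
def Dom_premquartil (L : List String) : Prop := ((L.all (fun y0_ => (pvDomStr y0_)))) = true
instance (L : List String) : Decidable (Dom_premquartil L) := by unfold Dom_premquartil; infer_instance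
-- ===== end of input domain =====

-- B computes the first quartile of the string lengths by quickselect (partition around a pivot,
-- recurse on one side) instead of A's full sort: a different algorithm of similar measured cost.


-- ===== PORT A =====
-- literal port of A: build the list of lengths with an index loop, sort it, index it
-- (pyGetD's default is only reachable on the empty list, which Pre_ excludes: there Python raises IndexError)
def premquartil (L : List String) : Int :=
  let quart := (PySem.List.pyRange 0 (L.length : Int) 1).foldl
      (fun acc k => acc ++ [PySem.Str.len (PySem.List.pyGetD L k "")]) []
  let quart := PySem.List.sorted quart (fun x => x) false
  let N : Int := PySem.Int.floordiv (quart.length : Int) 4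
  if PySem.Int.mod (quart.length : Int) 4 = 0 then
    PySem.List.pyGetD quart (PySem.Int.floordiv (quart.length : Int) 4 - 1) 0
  else
    PySem.List.pyGetD quart N 0

-- ===== PORT B =====
-- quickselect: k-th smallest of xs (0-based); 0 on the empty list (Python raises there, outside Pre_)
def qselect : List Int → Int → Int
  | [], _ => 0
  | p :: t, k =>
    let lt := (p :: t).filter (fun x => decide (x < p))
    let eqs := (p :: t).filter (fun x => x == p)
    if k < (lt.length : Int) then qselect lt k
    else if k < (lt.length : Int) + (eqs.length : Int) then p
    else qselect ((p :: t).filter (fun x => decide (p < x))) (k - (lt.length : Int) - (eqs.length : Int))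
termination_by xs _ => xs.length
decreasing_by
  · simp only [List.filter_cons, decide_eq_true_eq, lt_self_iff_false, if_false]
    exact Nat.lt_succ_of_le (List.length_filter_le _ _)
  · simp only [List.filter_cons, decide_eq_true_eq, lt_self_iff_false, if_false]
    exact Nat.lt_succ_of_le (List.length_filter_le _ _)

def premquartil_alt (L : List String) : Int :=
  let lengths := L.map PySem.Str.len
  let n : Int := (lengths.length : Int)
  let k : Int := if PySem.Int.mod n 4 = 0 then PySem.Int.floordiv n 4 - 1 else PySem.Int.floordiv n 4
  qselect lengths k

-- ===== PRECONDITION & SPEC =====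
-- Pre_ excludes only the empty list, where A raises IndexError (quart[-1] on an empty list)
def Pre_premquartil (L : List String) : Prop := L ≠ []
instance (L : List String) : Decidable (Pre_premquartil L) := by unfold Pre_premquartil; infer_instance
def pvWitness_premquartil : List String := ["ab", "", "abcd"]

def Spec_premquartil (L : List String) (out : Int) : Prop := out = premquartil_alt L
instance (L : List String) (out : Int) : Decidable (Spec_premquartil L out) := by unfold Spec_premquartil; infer_instance

-- ===== CLAIM (what is proved, stated in full; the proofs are below) =====
def Claim_equal_premquartil : Prop := ∀ (L : List String), Dom_premquartil L → Pre_premquartil L → Spec_premquartil L (premquartil L)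

-- ===== LEMMAS AND PROOFS =====

-- the three-way partition around a pivot is a permutation of the list
lemma part_perm (xs : List Int) (p : Int) :
    (xs.filter (fun x => decide (x < p)) ++ (xs.filter (fun x => x == p) ++ xs.filter (fun x => decide (p < x)))).Perm xs := by
  have h1 := List.filter_append_perm (fun x => decide (x < p)) xs
  have h2 := List.filter_append_perm (fun x => x == p) (xs.filter (fun x => !decide (x < p)))
  rw [List.filter_filter, List.filter_filter] at h2
  have e1 : xs.filter (fun x => x == p && !decide (x < p)) = xs.filter (fun x => x == p) := by
    apply List.filter_congr; intro x _; by_cases h : x = p <;> simp [h]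
  have e2 : xs.filter (fun x => !(x == p) && !decide (x < p)) = xs.filter (fun x => decide (p < x)) := by
    apply List.filter_congr; intro x _
    rcases lt_trichotomy x p with h|h|h
    · simp [h, asymm h]
    · simp [h]
    · simp [h, h.ne', asymm h]
  rw [e1, e2] at h2
  exact (List.Perm.append_left _ h2).trans h1

lemma sorted_partition (xs : List Int) (p : Int) :
    PySem.List.sorted xs (fun x => x) false =
      PySem.List.sorted (xs.filter (fun x => decide (x < p))) (fun x => x) false
      ++ xs.filter (fun x => x == p)
      ++ PySem.List.sorted (xs.filter (fun x => decide (p < x))) (fun x => x) false := by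
  have hLt := PySem.List.sorted_perm (xs.filter (fun x => decide (x < p))) (fun x => x) false
  have hGt := PySem.List.sorted_perm (xs.filter (fun x => decide (p < x))) (fun x => x) false
  have hperm2 : (PySem.List.sorted (xs.filter (fun x => decide (x < p))) (fun x => x) false
      ++ xs.filter (fun x => x == p)
      ++ PySem.List.sorted (xs.filter (fun x => decide (p < x))) (fun x => x) false).Perm xs := by
    rw [List.append_assoc]
    exact ((hLt.append ((List.Perm.refl _).append hGt)).trans (part_perm xs p))
  apply PySem.List.eq_of_perm_of_pairwise_le_of_injective (fun x => x) (fun a b h => h)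
  · exact (PySem.List.sorted_perm xs (fun x => x) false).trans hperm2.symm
  · exact PySem.List.sorted_pairwise xs (fun x => x)
  · rw [List.append_assoc, List.pairwise_append]
    refine ⟨PySem.List.sorted_pairwise _ _, ?_, ?_⟩
    · rw [List.pairwise_append]
      refine ⟨?_, PySem.List.sorted_pairwise _ _, ?_⟩
      · exact List.pairwise_iff_forall_sublist.2 (fun {a b} hs => by
          have ha : a = p := by simpa using (List.mem_filter.1 (hs.subset (by simp))).2
          have hb : b = p := by simpa using (List.mem_filter.1 (hs.subset (by simp))).2
          omega)
      · intro a ha b hb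
        have : a = p := by simpa using (List.mem_filter.1 ha).2
        have : p < b := by
          have := (List.mem_filter.1 ((PySem.List.mem_sorted _ _ _ _).1 hb)).2
          simpa using this
        omega
    · intro a ha b hb
      have ha' : a < p := by
        have := (List.mem_filter.1 ((PySem.List.mem_sorted _ _ _ _).1 ha)).2
        simpa using this
      rcases List.mem_append.1 hb with hb | hb
      · have : b = p := by simpa using (List.mem_filter.1 hb).2
        omega
      · have : p < b := by
          have := (List.mem_filter.1 ((PySem.List.mem_sorted _ _ _ _).1 hb)).2
          simpa using this
        omega

lemma qselect_sorted : ∀ (n : Nat) (xs : List Int) (k : Nat), xs.length ≤ n → k < xs.length →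
    qselect xs (k : Int) = (PySem.List.sorted xs (fun x => x) false).getD k 0 := by
  intro n
  induction n with
  | zero => intro xs k h1 h2; omega
  | succ n ih =>
    intro xs k h1 h2
    match xs with
    | [] => simp at h2
    | p :: t =>
      have hpmem : p ∈ (p::t).filter (fun x => x == p) := List.mem_filter.2 ⟨by simp, by simp⟩
      have hbpos : 0 < ((p::t).filter (fun x => x == p)).length := List.length_pos_of_mem hpmem
      have hlen : ((p::t).filter (fun x => decide (x < p))).length
          + ((p::t).filter (fun x => x == p)).length
          + ((p::t).filter (fun x => decide (p < x))).length = (p::t).length := by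
        have := (part_perm (p::t) p).length_eq
        simp only [List.length_append] at this
        omega
      rw [qselect, sorted_partition (p::t) p]
      have hslt := PySem.List.length_sorted ((p::t).filter (fun x => decide (x < p))) (fun x => x) false
      by_cases hk1 : k < ((p::t).filter (fun x => decide (x < p))).length
      · rw [if_pos (by exact_mod_cast hk1)]
        rw [List.getD_append _ _ _ _ (by simp only [List.length_append, hslt]; omega)]
        rw [List.getD_append _ _ _ _ (by omega)]
        exact ih _ k (by simp only [List.length_cons] at h1 hlen ⊢; omega) hk1
      · rw [if_neg (by exact_mod_cast hk1)]
        by_cases hk2 : k < ((p::t).filter (fun x => decide (x < p))).length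
            + ((p::t).filter (fun x => x == p)).length
        · rw [if_pos (by exact_mod_cast hk2)]
          rw [List.getD_append _ _ _ _ (by simp only [List.length_append, hslt]; omega)]
          rw [List.getD_append_right _ _ _ _ (by omega)]
          rw [List.getD_eq_getElem _ _ (by omega)]
          have hmem := List.getElem_mem (l := (p::t).filter (fun x => x == p))
            (n := k - (PySem.List.sorted ((p::t).filter (fun x => decide (x < p))) (fun x => x) false).length)
            (by omega)
          have := (List.mem_filter.1 hmem).2
          simp only [beq_iff_eq] at this
          omega
        · rw [if_neg (by exact_mod_cast hk2)]
          have hcast : ((k : Int) - (((p::t).filter (fun x => decide (x < p))).length : Int)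
              - (((p::t).filter (fun x => x == p)).length : Int))
              = ((k - ((p::t).filter (fun x => decide (x < p))).length
                  - ((p::t).filter (fun x => x == p)).length : Nat) : Int) := by
            omega
          rw [hcast]
          rw [List.getD_append_right _ _ _ _ (by simp only [List.length_append, hslt]; omega)]
          rw [ih _ _ (by simp only [List.length_cons] at h1 hlen ⊢; omega) (by omega)]
          congr 1
          simp only [List.length_append, hslt]
          omega

-- ===== VERDICT (by name: the statement is the Claim_ definition above) =====
theorem premquartil_spec : Claim_equal_premquartil := by
  intro L _ hL
  unfold Spec_premquartil premquartil premquartil_alt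
  simp only
  have hloop : (PySem.List.pyRange 0 (L.length : Int) 1).foldl
      (fun acc k => acc ++ [PySem.Str.len (PySem.List.pyGetD L k "")]) [] = L.map PySem.Str.len := by
    rw [PySem.List.foldl_pyRange_zero_pyGetD' (xs := L) (d := "") (f := fun acc s => acc ++ [PySem.Str.len s]) (init := [])]
    simpa using PySem.List.foldl_append_singleton_eq_map (l := L) (f := PySem.Str.len) (acc := [])
  rw [hloop]
  have hm : (L.map PySem.Str.len).length = L.length := List.length_map ..
  have hpos : 0 < L.length := List.length_pos_of_ne_nil hL
  have hsl : (PySem.List.sorted (L.map PySem.Str.len) (fun x => x) false).length = L.length := by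
    rw [PySem.List.length_sorted, hm]
  rw [hsl, hm]
  have hmod : PySem.Int.mod (L.length : Int) 4 = ((L.length % 4 : Nat) : Int) := by
    exact_mod_cast PySem.Int.mod_natCast L.length 4
  have hdiv : PySem.Int.floordiv (L.length : Int) 4 = ((L.length / 4 : Nat) : Int) := by
    exact_mod_cast PySem.Int.floordiv_natCast L.length 4
  rw [hmod, hdiv]
  by_cases h4 : L.length % 4 = 0
  · have h1 : 1 ≤ L.length / 4 := by omega
    rw [if_pos (by exact_mod_cast h4), if_pos (by exact_mod_cast h4)]
    have hc : ((L.length / 4 : Nat) : Int) - 1 = ((L.length / 4 - 1 : Nat) : Int) := by push_cast; omega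
    rw [hc, PySem.List.pyGetD_natCast, qselect_sorted (L.map PySem.Str.len).length _ _ le_rfl (by omega)]
  · rw [if_neg (by exact_mod_cast h4), if_neg (by exact_mod_cast h4)]
    rw [PySem.List.pyGetD_natCast, qselect_sorted (L.map PySem.Str.len).length _ _ le_rfl (by omega)]
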